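-- pv_equiv track=rewrite | github.com/ellismckenzielee/codewars-python | one_is_the_loneliest_number.py | loneliest
-- ===== SOURCE A (Python) =====
-- def loneliest(number):
--     diction = {1:1000}
--     numbers = list(map(int, list(str(number))))
--     loneliest_number = 100
--     for i, num in enumerate(numbers):
--         if i < num:
--             LHS = numbers[:i]
--         else:
--             LHS = numbers[i-num:i]
--         RHS = numbers[i+1: i +1 + num]
--         total = sum(LHS) + sum(RHS)
--         if num not in diction.keys():
--             diction[num] = total
--         elif total < diction[num]:
--             diction[num] = total
--         if total < loneliest_number:
--             loneliest_number = total
--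
--     return True if diction[1] == loneliest_number else False
-- ===== SOURCE B (Python) =====
-- def loneliest(number):
--     digits = [int(c) for c in str(number)]
--     n = len(digits)
--     pre = [0]
--     for d in digits:
--         pre.append(pre[-1] + d)
--     totals = [pre[min(i + 1 + d, n)] - pre[max(i - d, 0)] - d
--               for i, d in enumerate(digits)]
--     m = min(totals)
--     return m in [t for t, d in zip(totals, digits) if d == 1]
-- ===== Notes on version B (the rewrite author's own statement) =====
-- stated objective: alternative
-- what changed: B replaces A's per-position window re-summation (two slice sums inside the loop, tracked in a per-digit dictionary of minima with sentinel values 1000/100) by a prefix-sum table: each window total becomes the O(1) difference pre[hi]-pre[lo]-d, then a plain min and a membership test over the totals of digit-1 positions.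
import Mathlib
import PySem

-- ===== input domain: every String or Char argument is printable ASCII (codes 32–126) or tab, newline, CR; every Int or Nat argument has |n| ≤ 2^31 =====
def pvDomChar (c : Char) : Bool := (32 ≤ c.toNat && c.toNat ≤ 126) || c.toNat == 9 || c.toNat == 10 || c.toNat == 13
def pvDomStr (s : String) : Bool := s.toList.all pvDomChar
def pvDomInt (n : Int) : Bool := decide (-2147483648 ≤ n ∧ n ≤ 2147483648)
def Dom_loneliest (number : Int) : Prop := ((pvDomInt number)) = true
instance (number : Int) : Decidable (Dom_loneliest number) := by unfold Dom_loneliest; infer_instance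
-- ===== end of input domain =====

-- B replaces A's per-position window re-summation (two slice sums per digit, tracked in a
-- per-digit dictionary of minima with sentinels 1000/100) by a prefix-sum table: each window
-- total is the difference pre[hi]-pre[lo]-d; then a plain min and a membership test.

-- ===== PORT A =====
-- one iteration of A's for-loop; state = (diction, loneliest_number)
def loneliestStep (numbers : List Int) (st : PySem.Dict Int Int × Int) (p : Int × Int) :
    PySem.Dict Int Int × Int :=
  let i := p.1
  let num := p.2
  let LHS := if i < num then PySem.List.slice numbers none (some i)
             else PySem.List.slice numbers (some (i - num)) (some i)
  let RHS := PySem.List.slice numbers (some (i + 1)) (some (i + 1 + num))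
  let total := LHS.sum + RHS.sum
  let diction :=
    if ¬ (num ∈ st.1.keys) then st.1.insert num total
    else if total < st.1.getD num 0 then st.1.insert num total  -- diction[num] exists in this branch, getD is exact
    else st.1
  let L := if total < st.2 then total else st.2
  (diction, L)

def loneliest (number : Int) : Bool :=
  let diction : PySem.Dict Int Int := PySem.Dict.ofList [(1, 1000)]
  -- int(c) on each character of str(number); under Pre_ every character is a digit, so
  -- PySem.Int.ofChars? is `some` and the getD 0 default is never used (Python would raise on '-')
  let numbers : List Int :=
    (PySem.Int.toStr number).toList.map (fun c => (PySem.Int.ofChars? [c]).getD 0)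
  let st := (PySem.List.enumerate numbers 0).foldl (loneliestStep numbers) (diction, 100)
  decide (st.1.getD 1 0 = st.2)  -- key 1 is always present, so diction[1] = getD 1 0

-- ===== PORT B =====
def loneliest_alt (number : Int) : Bool :=
  let digits : List Int :=
    (PySem.Int.toStr number).toList.map (fun c => (PySem.Int.ofChars? [c]).getD 0)
  let n : Int := digits.length
  -- pre = [0]; for d in digits: pre.append(pre[-1] + d)
  let pre : List Int :=
    digits.foldl (fun acc d => acc ++ [(PySem.List.pyGet? acc (-1)).getD 0 + d]) [0]
  -- indices min(i+1+d, n) and max(i-d, 0) are always in range, so the getD 0 default is never used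
  let totals : List Int := (PySem.List.enumerate digits 0).map (fun p =>
    (PySem.List.pyGet? pre (min (p.1 + 1 + p.2) n)).getD 0 -
    (PySem.List.pyGet? pre (max (p.1 - p.2) 0)).getD 0 - p.2)
  -- min(totals): str(number) is never empty, so min? is `some` and the getD 0 default is never used
  let m := (PySem.List.min? totals (fun t => t)).getD 0
  (((totals.zip digits).filter (fun q => q.2 == 1)).map (fun q => q.1)).contains m

-- ===== PRECONDITION & SPEC =====
-- Pre_ excludes negative numbers: there str(number) starts with '-' and A raises ValueError at int('-') (so does B).
def Pre_loneliest (number : Int) : Prop := 0 ≤ number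
instance (number : Int) : Decidable (Pre_loneliest number) := by unfold Pre_loneliest; infer_instance
def pvWitness_loneliest : Int := (12)

def Spec_loneliest (number : Int) (out : Bool) : Prop := out = loneliest_alt number
instance (number : Int) (out : Bool) : Decidable (Spec_loneliest number out) := by unfold Spec_loneliest; infer_instance

-- ===== CLAIM (what is proved, stated in full; the proofs are below) =====
def Claim_equal_loneliest : Prop := ∀ (number : Int), Dom_loneliest number → Pre_loneliest number → Spec_loneliest number (loneliest number)

-- ===== LEMMAS AND PROOFS =====

-- the window total at an enumerate pair p, exactly as A computes it
def pvT (ds : List Int) (p : Int × Int) : Int :=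
  (if p.1 < p.2 then PySem.List.slice ds none (some p.1)
   else PySem.List.slice ds (some (p.1 - p.2)) (some p.1)).sum +
  (PySem.List.slice ds (some (p.1 + 1)) (some (p.1 + 1 + p.2))).sum

-- running prefix sums of l continued from s (what B's append loop builds past the initial [0])
def pvScan : List Int → Int → List Int
  | [], _ => []
  | d :: t, s => (s + d) :: pvScan t (s + d)

-- B's append loop is pvScan
theorem pv_fold_scan (l : List Int) :
    ∀ (acc : List Int) (s : Int), acc.getLast? = some s →
    l.foldl (fun acc d => acc ++ [(PySem.List.pyGet? acc (-1)).getD 0 + d]) acc =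
      acc ++ pvScan l s := by
  induction l with
  | nil => intro acc s _; simp [pvScan]
  | cons d t ih =>
    intro acc s hs
    simp only [List.foldl_cons, pvScan]
    rw [PySem.List.pyGet?_neg_one, hs]
    simp only [Option.getD_some]
    have hlast : (acc ++ [s + d]).getLast? = some (s + d) := by
      simp [List.getLast?_append]
    rw [ih (acc ++ [s + d]) (s + d) hlast]
    simp

theorem pv_scan_getElem? (l : List Int) :
    ∀ (s : Int) (j : Nat), j < l.length →
      (pvScan l s)[j]? = some (s + (l.take (j + 1)).sum) := by
  induction l with
  | nil => intro s j h; simp at h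
  | cons d t ih =>
    intro s j h
    cases j with
    | zero => simp [pvScan]
    | succ j =>
      simp only [pvScan, List.getElem?_cons_succ, List.take_succ_cons, List.sum_cons]
      rw [ih (s + d) j (by simpa using h)]
      congr 1
      ring

-- the full pre list indexed: pre[k] = sum of the first k digits
theorem pv_pre_getElem? (ds : List Int) (k : Nat) (hk : k ≤ ds.length) :
    ((0 : Int) :: pvScan ds 0)[k]? = some (ds.take k).sum := by
  cases k with
  | zero => simp
  | succ k =>
    simp only [List.getElem?_cons_succ]
    rw [pv_scan_getElem? ds 0 k (by omega)]
    simp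

-- sum over a window as a difference of prefix sums
theorem pv_sum_drop_take (ds : List Int) (a t : Nat) :
    ((ds.drop a).take t).sum = (ds.take (a + t)).sum - (ds.take a).sum := by
  have h := congrArg List.sum (List.take_add (l := ds) (i := a) (j := t))
  rw [List.sum_append] at h
  omega

-- B's max-clamped left slice is A's branched left slice
theorem pv_slice_max_eq (ds : List Int) (i d : Int) :
    PySem.List.slice ds (some (max (i - d) 0)) (some i) =
    if i < d then PySem.List.slice ds none (some i)
    else PySem.List.slice ds (some (i - d)) (some i) := by
  split_ifs with h
  · rw [max_eq_right (by omega : i - d ≤ 0), PySem.List.slice_zero_start]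
  · rw [max_eq_left (by omega : 0 ≤ i - d)]

-- A's loop, projected to the only state it finally reads: diction[1] and loneliest_number
theorem pv_loopA_proj (ds : List Int) (ps : List (Int × Int)) :
    ∀ (dict : PySem.Dict Int Int) (L : Int), dict.contains 1 = true →
    (ps.foldl (loneliestStep ds) (dict, L)).1.getD 1 0 =
      ps.foldl (fun a p => if p.2 = 1 ∧ pvT ds p < a then pvT ds p else a) (dict.getD 1 0) ∧
    (ps.foldl (loneliestStep ds) (dict, L)).2 =
      ps.foldl (fun a p => if pvT ds p < a then pvT ds p else a) L := by
  induction ps with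
  | nil => intro dict L h; exact ⟨rfl, rfl⟩
  | cons p t ih =>
    intro dict L h
    obtain ⟨i, num⟩ := p
    have hstep : loneliestStep ds (dict, L) (i, num) =
        ((if ¬ (num ∈ dict.keys) then dict.insert num (pvT ds (i, num))
          else if pvT ds (i, num) < dict.getD num 0 then dict.insert num (pvT ds (i, num)) else dict),
         (if pvT ds (i, num) < L then pvT ds (i, num) else L)) := rfl
    simp only [List.foldl_cons, hstep]
    have h1 : (1 : Int) ∈ dict.keys := (PySem.Dict.contains_iff_mem_keys dict 1).mp h
    set tt := pvT ds (i, num) with htt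
    by_cases he : num = 1
    · subst he
      simp only [h1, not_true, if_false]
      by_cases hlt : tt < dict.getD 1 0
      · rw [if_pos hlt]
        have hc : (dict.insert 1 tt).contains 1 = true := by
          rw [PySem.Dict.contains_insert]; simp
        have := ih (dict.insert 1 tt) (if tt < L then tt else L) hc
        rw [this.1, this.2]
        constructor
        · rw [PySem.Dict.getD_insert]; simp [hlt]
        · rfl
      · rw [if_neg hlt]
        have := ih dict (if tt < L then tt else L) h
        rw [this.1, this.2]
        constructor
        · simp [hlt]
        · rfl
    · -- num ≠ 1 : the key-1 value is unchanged whichever branch is taken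
      have hins : ∀ v, ((dict.insert num v).contains 1 = true ∧ (dict.insert num v).getD 1 0 = dict.getD 1 0) := by
        intro v
        constructor
        · rw [PySem.Dict.contains_insert]; simp [h]
        · rw [PySem.Dict.getD_insert]; simp [Ne.symm he]
      have hsimp : (if (num : Int) = 1 ∧ tt < dict.getD 1 0 then tt else dict.getD 1 0) = dict.getD 1 0 := by
        simp [he]
      rw [hsimp]
      by_cases hk : num ∈ dict.keys
      · by_cases hlt : tt < dict.getD num 0
        · simp only [hk, not_true, if_false, if_pos hlt]
          have := ih (dict.insert num tt) (if tt < L then tt else L) (hins tt).1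
          rw [this.1, this.2, (hins tt).2]
          exact ⟨rfl, rfl⟩
        · simp only [hk, not_true, if_false, if_neg hlt]
          have := ih dict (if tt < L then tt else L) h
          rw [this.1, this.2]
          exact ⟨rfl, rfl⟩
      · simp only [hk, not_false_iff, if_true]
        have := ih (dict.insert num tt) (if tt < L then tt else L) (hins tt).1
        rw [this.1, this.2, (hins tt).2]
        exact ⟨rfl, rfl⟩

theorem pv_condfold_spec {α : Type} (g : α → Int) (P : α → Prop) [DecidablePred P] (ps : List α) :
    ∀ (a : Int),
    ((ps.foldl (fun a x => if P x ∧ g x < a then g x else a) a) = a ∨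
      ∃ x ∈ ps, P x ∧ g x = ps.foldl (fun a x => if P x ∧ g x < a then g x else a) a) ∧
    (∀ x ∈ ps, P x → ps.foldl (fun a x => if P x ∧ g x < a then g x else a) a ≤ g x) ∧
    ps.foldl (fun a x => if P x ∧ g x < a then g x else a) a ≤ a := by
  induction ps with
  | nil => intro a; refine ⟨Or.inl rfl, by simp, le_refl a⟩
  | cons p t ih =>
    intro a
    simp only [List.foldl_cons]
    by_cases hc : P p ∧ g p < a
    · rw [if_pos hc]
      obtain ⟨h1, h2, h3⟩ := ih (g p)
      refine ⟨?_, ?_, by omega⟩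
      · rcases h1 with h1 | ⟨x, hx, hPx, hgx⟩
        · exact Or.inr ⟨p, by simp, hc.1, h1.symm⟩
        · exact Or.inr ⟨x, by simp [hx], hPx, hgx⟩
      · intro x hx hPx
        rcases List.mem_cons.mp hx with rfl | hx
        · omega
        · exact h2 x hx hPx
    · rw [if_neg hc]
      obtain ⟨h1, h2, h3⟩ := ih a
      refine ⟨?_, ?_, h3⟩
      · rcases h1 with h1 | ⟨x, hx, hPx, hgx⟩
        · exact Or.inl h1
        · exact Or.inr ⟨x, by simp [hx], hPx, hgx⟩
      · intro x hx hPx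
        rcases List.mem_cons.mp hx with rfl | hx
        · have : ¬ g x < a := fun hlt => hc ⟨hPx, hlt⟩
          omega
        · exact h2 x hx hPx

theorem pv_minfold_spec {α : Type} (g : α → Int) (ps : List α) :
    ∀ (a : Int),
    ((ps.foldl (fun a x => if g x < a then g x else a) a) = a ∨
      ∃ x ∈ ps, g x = ps.foldl (fun a x => if g x < a then g x else a) a) ∧
    (∀ x ∈ ps, ps.foldl (fun a x => if g x < a then g x else a) a ≤ g x) ∧
    ps.foldl (fun a x => if g x < a then g x else a) a ≤ a := by
  induction ps with
  | nil => intro a; exact ⟨Or.inl rfl, by simp, le_refl a⟩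
  | cons p t ih =>
    intro a
    simp only [List.foldl_cons]
    by_cases hc : g p < a
    · rw [if_pos hc]
      obtain ⟨h1, h2, h3⟩ := ih (g p)
      refine ⟨?_, ?_, by omega⟩
      · rcases h1 with h1 | ⟨x, hx, hgx⟩
        · exact Or.inr ⟨p, by simp, h1.symm⟩
        · exact Or.inr ⟨x, by simp [hx], hgx⟩
      · intro x hx
        rcases List.mem_cons.mp hx with rfl | hx
        · omega
        · exact h2 x hx
    · rw [if_neg hc]
      obtain ⟨h1, h2, h3⟩ := ih a
      refine ⟨?_, ?_, h3⟩
      · rcases h1 with h1 | ⟨x, hx, hgx⟩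
        · exact Or.inl h1
        · exact Or.inr ⟨x, by simp [hx], hgx⟩
      · intro x hx
        rcases List.mem_cons.mp hx with rfl | hx
        · omega
        · exact h2 x hx

theorem pv_toDigitsCore_eq_nil (f : Nat) :
    ∀ (n : Nat) (ds : List Char), Nat.toDigitsCore 10 f n ds = [] → ds = [] := by
  induction f with
  | zero => intro n ds h; simpa [Nat.toDigitsCore] using h
  | succ f ih =>
    intro n ds h
    simp only [Nat.toDigitsCore] at h
    by_cases hn : n / 10 = 0
    · simp [hn] at h
    · simp only [hn, if_false] at h
      have := ih _ _ h
      simp at this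

theorem pv_toChars_ne_nil (n : Int) (h : 0 ≤ n) : PySem.Int.toChars n ≠ [] := by
  have : PySem.Int.toChars n = Nat.toDigits 10 n.toNat := by
    simp [PySem.Int.toChars, not_lt.mpr h]
  rw [this, Nat.toDigits]
  intro hnil
  simp only [Nat.toDigitsCore] at hnil
  by_cases hn : n.toNat / 10 = 0
  · simp [hn] at hnil
  · simp only [hn, if_false] at hnil
    have := pv_toDigitsCore_eq_nil _ _ _ hnil
    simp at this

theorem pv_toDigitsCore_mem (f : Nat) :
    ∀ (n : Nat) (ds : List Char) (c : Char), c ∈ Nat.toDigitsCore 10 f n ds →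
      c ∈ ds ∨ ∃ k, k < 10 ∧ c = Nat.digitChar k := by
  induction f with
  | zero => intro n ds c h; simp only [Nat.toDigitsCore] at h; exact Or.inl h
  | succ f ih =>
    intro n ds c h
    simp only [Nat.toDigitsCore] at h
    by_cases hn : n / 10 = 0
    · simp only [hn, if_true] at h
      rcases List.mem_cons.mp h with rfl | h
      · exact Or.inr ⟨n % 10, Nat.mod_lt n (by norm_num), rfl⟩
      · exact Or.inl h
    · simp only [hn, if_false] at h
      rcases ih _ _ _ h with h | h
      · rcases List.mem_cons.mp h with rfl | h
        · exact Or.inr ⟨n % 10, Nat.mod_lt n (by norm_num), rfl⟩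
        · exact Or.inl h
      · exact Or.inr h

theorem pv_digitChar_val (k : Nat) (hk : k < 10) :
    0 ≤ (PySem.Int.ofChars? [Nat.digitChar k]).getD 0 ∧
    (PySem.Int.ofChars? [Nat.digitChar k]).getD 0 ≤ 9 := by
  interval_cases k <;> exact ⟨by decide, by decide⟩

theorem pv_toChars_digit (n : Int) (h : 0 ≤ n) :
    ∀ c ∈ PySem.Int.toChars n,
      0 ≤ (PySem.Int.ofChars? [c]).getD 0 ∧ (PySem.Int.ofChars? [c]).getD 0 ≤ 9 := by
  intro c hc
  have : PySem.Int.toChars n = Nat.toDigits 10 n.toNat := by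
    simp [PySem.Int.toChars, not_lt.mpr h]
  rw [this, Nat.toDigits] at hc
  rcases pv_toDigitsCore_mem _ _ _ _ hc with h' | ⟨k, hk, rfl⟩
  · simp at h'
  · exact pv_digitChar_val k hk

theorem pv_sum_le (l : List Int) (h : ∀ x ∈ l, x ≤ 9) : l.sum ≤ 9 * l.length := by
  induction l with
  | nil => simp
  | cons x t ih =>
    simp only [List.sum_cons, List.length_cons]
    have hx := h x (by simp)
    have ht := ih (fun y hy => h y (by simp [hy]))
    push_cast; omega

theorem pv_slice_sum_le (ds : List Int) (hds : ∀ x ∈ ds, x ≤ 9) (a? b? : Option Int)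
    (hlen : (PySem.List.slice ds a? b?).length ≤ 1) :
    (PySem.List.slice ds a? b?).sum ≤ 9 := by
  have h1 := pv_sum_le _ (fun x hx => hds x (PySem.List.mem_of_mem_slice ds a? b? hx))
  have : ((PySem.List.slice ds a? b?).length : Int) ≤ 1 := by exact_mod_cast hlen
  omega

theorem pv_T_one_le (ds : List Int) (hds : ∀ x ∈ ds, x ≤ 9) (k : Nat) :
    pvT ds ((k : Int), 1) ≤ 18 := by
  unfold pvT
  have hR : PySem.List.slice ds (some ((k : Int) + 1)) (some ((k : Int) + 1 + 1)) =
      (ds.drop (k + 1)).take 1 := by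
    have h1 : ((k : Int) + 1) = ((k + 1 : Nat) : Int) := by push_cast; ring
    have h2 : ((k : Int) + 1 + 1) = ((k + 2 : Nat) : Int) := by push_cast; ring
    rw [h2, h1, PySem.List.slice_natCast]
    congr 1
    omega
  have hRle : (PySem.List.slice ds (some ((k : Int) + 1)) (some ((k : Int) + 1 + 1))).sum ≤ 9 := by
    apply pv_slice_sum_le ds hds
    rw [hR]; simp [List.length_take]
  by_cases hk : (k : Int) < 1
  · rw [if_pos hk]
    have hk0 : k = 0 := by omega
    subst hk0
    have h0 : PySem.List.slice ds none (some ((0 : Nat) : Int)) = [] := by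
      rw [PySem.List.slice_to_natCast]
      simp
    rw [h0, List.sum_nil, zero_add]
    linarith [hRle]
  · rw [if_neg hk]
    have hL : PySem.List.slice ds (some ((k : Int) - 1)) (some (k : Int)) =
        (ds.drop (k - 1)).take 1 := by
      have h1 : ((k : Int) - 1) = ((k - 1 : Nat) : Int) := by omega
      rw [h1, PySem.List.slice_natCast]
      congr 1
      omega
    have hLle : (PySem.List.slice ds (some ((k : Int) - 1)) (some (k : Int))).sum ≤ 9 := by
      apply pv_slice_sum_le ds hds
      rw [hL]; simp [List.length_take]
    linarith [hLle, hRle]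

theorem pv_condfold_spec' (ds : List Int) (ps : List (Int × Int)) (a : Int) :
    ((ps.foldl (fun a p => if p.2 = 1 ∧ pvT ds p < a then pvT ds p else a) a) = a ∨
      ∃ p ∈ ps, p.2 = 1 ∧ pvT ds p = ps.foldl (fun a p => if p.2 = 1 ∧ pvT ds p < a then pvT ds p else a) a) ∧
    (∀ p ∈ ps, p.2 = 1 → ps.foldl (fun a p => if p.2 = 1 ∧ pvT ds p < a then pvT ds p else a) a ≤ pvT ds p) ∧
    ps.foldl (fun a p => if p.2 = 1 ∧ pvT ds p < a then pvT ds p else a) a ≤ a :=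
  pv_condfold_spec (pvT ds) (fun p => p.2 = 1) ps a

theorem pv_minfold_spec' (ds : List Int) (ps : List (Int × Int)) (a : Int) :
    ((ps.foldl (fun a p => if pvT ds p < a then pvT ds p else a) a) = a ∨
      ∃ p ∈ ps, pvT ds p = ps.foldl (fun a p => if pvT ds p < a then pvT ds p else a) a) ∧
    (∀ p ∈ ps, ps.foldl (fun a p => if pvT ds p < a then pvT ds p else a) a ≤ pvT ds p) ∧
    ps.foldl (fun a p => if pvT ds p < a then pvT ds p else a) a ≤ a :=
  pv_minfold_spec (pvT ds) ps a

-- membership in a filtered-mapped list as an any over the original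
theorem pv_contains_filter_map {α : Type} (l : List (Int × α)) (p : Int × α → Bool) (m : Int) :
    (((l.filter p).map (fun q => q.1)).contains m) = l.any (fun q => p q && q.1 == m) := by
  rw [← List.any_beq', List.any_map, List.any_filter]
  rfl

-- B's prefix-sum window total equals A's slice-sum window total, at every digit position
theorem pv_totals_eq (ds : List Int) (hds0 : ∀ x ∈ ds, 0 ≤ x)
    (k : Nat) (hk : k < ds.length) :
    (PySem.List.pyGet? ((0 : Int) :: pvScan ds 0)
        (min ((k : Int) + 1 + ds[k]) (ds.length : Int))).getD 0 -
    (PySem.List.pyGet? ((0 : Int) :: pvScan ds 0)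
        (max ((k : Int) - ds[k]) 0)).getD 0 - ds[k] =
    pvT ds ((k : Int), ds[k]) := by
  set d : Int := ds[k] with hd
  have hd0 : 0 ≤ d := hds0 _ (List.getElem_mem hk)
  set d' : Nat := d.toNat with hd'
  have hdd : d = (d' : Int) := by omega
  set n : Nat := ds.length with hn
  set S : Nat → Int := fun j => (ds.take j).sum with hS
  -- the two indices as naturals
  have hhi : min ((k : Int) + 1 + d) (n : Int) = ((min (k + 1 + d') n : Nat) : Int) := by
    push_cast; omega
  have hlo : max ((k : Int) - d) 0 = (((k - d' : Nat)) : Int) := by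
    omega
  have hpre_hi : (PySem.List.pyGet? ((0 : Int) :: pvScan ds 0) (min ((k : Int) + 1 + d) (n : Int))).getD 0
      = S (min (k + 1 + d') n) := by
    rw [hhi, PySem.List.pyGet?_natCast, pv_pre_getElem? ds _ (by omega)]
    rfl
  have hpre_lo : (PySem.List.pyGet? ((0 : Int) :: pvScan ds 0) (max ((k : Int) - d) 0)).getD 0
      = S (k - d') := by
    rw [hlo, PySem.List.pyGet?_natCast, pv_pre_getElem? ds _ (by omega)]
    rfl
  rw [hpre_hi, hpre_lo]
  -- now the A side
  have hTA : pvT ds ((k : Int), d) = (S k - S (k - d')) + (S (k + 1 + d') - S (k + 1)) := by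
    unfold pvT
    have hleft : (if (k : Int) < d then PySem.List.slice ds none (some (k : Int))
        else PySem.List.slice ds (some ((k : Int) - d)) (some (k : Int))) =
        PySem.List.slice ds (some (max ((k : Int) - d) 0)) (some (k : Int)) :=
      (pv_slice_max_eq ds (k : Int) d).symm
    rw [show ((k : Int), d).1 = (k : Int) from rfl, show ((k : Int), d).2 = d from rfl] at *
    simp only [hleft]
    have hL : PySem.List.slice ds (some (max ((k : Int) - d) 0)) (some (k : Int)) =
        (ds.drop (k - d')).take (k - (k - d')) := by
      rw [hlo, PySem.List.slice_natCast]
    have hR : PySem.List.slice ds (some ((k : Int) + 1)) (some ((k : Int) + 1 + d)) =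
        (ds.drop (k + 1)).take ((k + 1 + d') - (k + 1)) := by
      have h1 : ((k : Int) + 1) = ((k + 1 : Nat) : Int) := by push_cast; ring
      have h2 : ((k : Int) + 1 + d) = ((k + 1 + d' : Nat) : Int) := by push_cast; omega
      rw [h2, h1, PySem.List.slice_natCast]
    rw [hL, hR, pv_sum_drop_take, pv_sum_drop_take]
    have e1 : (k - d') + (k - (k - d')) = k := by omega
    have e2 : (k + 1) + ((k + 1 + d') - (k + 1)) = k + 1 + d' := by omega
    rw [e1, e2]
  rw [hTA]
  -- S (k+1) = S k + d  and  S clamps at n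
  have hsucc : S (k + 1) = S k + d := by
    have := List.take_add_one (l := ds) (i := k)
    have hget : ds[k]?.toList = [d] := by
      rw [List.getElem?_eq_getElem hk]
      rfl
    rw [hget] at this
    simp only [hS]
    rw [this, List.sum_append]
    simp
  have hclamp : S (min (k + 1 + d') n) = S (k + 1 + d') := by
    by_cases hle : k + 1 + d' ≤ n
    · rw [min_eq_left hle]
    · rw [min_eq_right (by omega : n ≤ k + 1 + d')]
      simp only [hS]
      rw [List.take_of_length_le (by omega), List.take_of_length_le (by omega)]
  rw [hclamp]
  omega

-- A = B for a nonnegative number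
theorem pv_main (number : Int) (hpre : 0 ≤ number) : loneliest number = loneliest_alt number := by
  set ds : List Int :=
    (PySem.Int.toStr number).toList.map (fun c => (PySem.Int.ofChars? [c]).getD 0) with hdsdef
  set ps := PySem.List.enumerate ds 0 with hpsdef
  set d1 := ps.foldl (fun a p => if p.2 = 1 ∧ pvT ds p < a then pvT ds p else a) (1000 : Int)
    with hd1def
  set Lf := ps.foldl (fun a p => if pvT ds p < a then pvT ds p else a) (100 : Int) with hLfdef
  have hds9 : ∀ x ∈ ds, x ≤ 9 := by
    intro x hx
    rw [hdsdef] at hx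
    obtain ⟨c, hc, rfl⟩ := List.mem_map.mp hx
    rw [PySem.Int.toList_toStr] at hc
    exact (pv_toChars_digit number hpre c hc).2
  have hds0 : ∀ x ∈ ds, 0 ≤ x := by
    intro x hx
    rw [hdsdef] at hx
    obtain ⟨c, hc, rfl⟩ := List.mem_map.mp hx
    rw [PySem.Int.toList_toStr] at hc
    exact (pv_toChars_digit number hpre c hc).1
  have hdsne : ds ≠ [] := by
    rw [hdsdef]
    simp only [ne_eq, List.map_eq_nil_iff]
    rw [PySem.Int.toList_toStr]
    exact pv_toChars_ne_nil number hpre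
  have hAval : loneliest number = decide (d1 = Lf) := by
    simp only [loneliest]
    have h := pv_loopA_proj ds ps (PySem.Dict.ofList [((1 : Int), (1000 : Int))]) 100 (by decide)
    rw [← hdsdef, ← hpsdef, h.1, h.2,
        (by decide : (PySem.Dict.ofList [((1 : Int), (1000 : Int))]).getD 1 0 = (1000 : Int)),
        ← hd1def, ← hLfdef]
  -- B's pre list is the prefix-sum list
  have hpre_list : ds.foldl (fun acc d => acc ++ [(PySem.List.pyGet? acc (-1)).getD 0 + d])
      [(0 : Int)] = (0 : Int) :: pvScan ds 0 := by
    rw [pv_fold_scan ds [0] 0 (by rfl)]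
    rfl
  -- B's totals list is ps.map (pvT ds)
  have htot : ps.map (fun p : Int × Int =>
      (PySem.List.pyGet? ((0 : Int) :: pvScan ds 0) (min (p.1 + 1 + p.2) (ds.length : Int))).getD 0 -
      (PySem.List.pyGet? ((0 : Int) :: pvScan ds 0) (max (p.1 - p.2) 0)).getD 0 - p.2)
      = ps.map (pvT ds) := by
    apply List.map_congr_left
    intro p hp
    obtain ⟨k, hk, rfl⟩ := (PySem.List.mem_enumerate_iff ds 0 p).mp hp
    simpa using pv_totals_eq ds hds0 k hk
  obtain ⟨m, hm⟩ : ∃ m, PySem.List.min? (ps.map (pvT ds)) (fun t => t) = some m := by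
    cases h : PySem.List.min? (ps.map (pvT ds)) (fun t => t) with
    | some m => exact ⟨m, rfl⟩
    | none =>
      rw [PySem.List.min?_eq_none_iff] at h
      have h2 := congrArg (List.map (fun x : Int × Int => x.2)) (List.map_eq_nil_iff.mp h)
      rw [PySem.List.map_snd_enumerate] at h2
      exact absurd (by simpa using h2) hdsne
  have hmap2 : ps.map (fun x : Int × Int => x.2) = ds := PySem.List.map_snd_enumerate ds 0
  have hBval : loneliest_alt number =
      ps.any (fun p => p.2 == 1 && pvT ds p == m) := by
    simp only [loneliest_alt]
    rw [← hdsdef, ← hpsdef, hpre_list, htot, hm]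
    have hz : (ps.map (pvT ds)).zip (ps.map (fun x : Int × Int => x.2)) =
        ps.map (fun x => (pvT ds x, x.2)) := List.zip_map' ..
    rw [hmap2] at hz
    rw [hz, pv_contains_filter_map, List.any_map]
    rfl
  rw [hAval, hBval]
  obtain ⟨hcf1, hcf2, hcf3⟩ := pv_condfold_spec' ds ps 1000
  obtain ⟨hmf1, hmf2, hmf3⟩ := pv_minfold_spec' ds ps 100
  rw [← hd1def] at hcf1 hcf2 hcf3
  rw [← hLfdef] at hmf1 hmf2 hmf3
  obtain ⟨pm, hpm_mem, hpm_eq⟩ : ∃ p ∈ ps, pvT ds p = m := by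
    obtain ⟨p, hp, he⟩ := List.mem_map.mp (PySem.List.min?_mem hm)
    exact ⟨p, hp, he⟩
  have hmle : ∀ p ∈ ps, m ≤ pvT ds p := by
    intro p hp
    simpa using PySem.List.min?_isMin hm (pvT ds p) (List.mem_map_of_mem hp)
  by_cases hone : ∃ p ∈ ps, p.2 = 1
  · obtain ⟨p0, hp0, hp01⟩ := hone
    have hp0T : pvT ds p0 ≤ 18 := by
      obtain ⟨k, hk, hpe⟩ := (PySem.List.mem_enumerate_iff ds 0 p0).mp hp0
      have hds1 : ds[k] = 1 := by rw [hpe] at hp01; exact hp01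
      have : p0 = ((k : Int), 1) := by rw [hpe, hds1]; simp
      rw [this]
      exact pv_T_one_le ds hds9 k
    have hd1le : d1 ≤ 18 := le_trans (hcf2 p0 hp0 hp01) hp0T
    obtain ⟨q, hq, hq1, hqd⟩ : ∃ q ∈ ps, q.2 = 1 ∧ pvT ds q = d1 := by
      rcases hcf1 with h | h
      · exfalso; omega
      · exact h
    have hmd1 : m ≤ d1 := hqd ▸ hmle q hq
    have hLfle : Lf ≤ 18 := le_trans (hmf2 p0 hp0) hp0T
    obtain ⟨r, hr, hrd⟩ : ∃ r ∈ ps, pvT ds r = Lf := by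
      rcases hmf1 with h | h
      · exfalso; omega
      · exact h
    have hLfm : Lf = m := by
      have h1 : m ≤ Lf := hrd ▸ hmle r hr
      have h2 : Lf ≤ m := hpm_eq ▸ hmf2 pm hpm_mem
      omega
    rw [hLfm]
    by_cases hdm : d1 = m
    · rw [hdm]
      have htrue : decide (m = m) = true := by simp
      rw [htrue]
      symm
      rw [List.any_eq_true]
      refine ⟨q, hq, ?_⟩
      simp only [Bool.and_eq_true, beq_iff_eq]
      exact ⟨hq1, hqd.trans hdm⟩
    · have hfalse : decide (d1 = m) = false := by simp [hdm]
      rw [hfalse]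
      symm
      rw [List.any_eq_false]
      intro p hp
      simp only [Bool.and_eq_true, beq_iff_eq, not_and]
      intro h1 h2
      have := hcf2 p hp h1
      omega
  · have hd1 : d1 = 1000 := by
      rcases hcf1 with h | ⟨x, hx, hPx, _⟩
      · exact h
      · exact absurd ⟨x, hx, hPx⟩ hone
    have hfalse : decide (d1 = Lf) = false := by
      simp only [decide_eq_false_iff_not]
      intro h'
      omega
    rw [hfalse]
    symm
    rw [List.any_eq_false]
    intro p hp
    simp only [Bool.and_eq_true, beq_iff_eq, not_and]
    intro h1 _
    exact absurd ⟨p, hp, h1⟩ hone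

-- ===== VERDICT (by name: the statement is the Claim_ definition above) =====
theorem loneliest_spec : Claim_equal_loneliest := by
  intro number _hdom hpre
  exact pv_main number hpre
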